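-- pv_equiv track=rewrite | github.com/reverseon/my-foobar-collection | expanding-nebula.py | searchspace
-- ===== SOURCE A (Python) =====
-- from collections import defaultdict
--
-- def zo1(a, b):
--   return 1 if ((a == 1 or a ==2) and b == 0) or ((b == 1 or b ==2) and a == 0) else 0
--
-- def compute(a, b, n):
--   res = 0
--   for i in range(n):
--     picker = 0b11 << i
--     c1 = (a & picker) >> i
--     c2 = (b & picker) >> i
--     res += zo1(c1, c2) << i
--   return res
--
-- def searchspace(num, ncol):
--   s = set(num)
--   ssp = defaultdict(set)
--   for i in range(1<<(ncol+1)):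
--     for j in range(1<<(ncol+1)):
--       af = compute(i, j, ncol)
--       if af in s:
--         ssp[(i, af)].add(j)
--   return ssp
-- ===== SOURCE B (Python) =====
-- from collections import defaultdict
--
-- def searchspace(num, ncol):
--     s = set(num)
--     n = 1 << (ncol + 1)
--     mask = (1 << ncol) - 1 if ncol >= 0 else 0
--     ssp = defaultdict(set)
--     for i in range(n):
--         xi = (i ^ (i >> 1)) & mask
--         zi = mask ^ ((i | (i >> 1)) & mask)
--         for j in range(n):
--             af = (xi & (mask ^ ((j | (j >> 1)) & mask))) | (((j ^ (j >> 1)) & mask) & zi)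
--             if af in s:
--                 ssp[(i, af)].add(j)
--     return ssp
-- ===== Notes on version B (the rewrite author's own statement) =====
-- stated objective: alternative
-- what changed: A's inner helper compute() loops over all ncol bit-windows for every pair (i,j); B replaces that loop by a closed-form bitwise formula af = (xi & zj) | (xj & zi) built from v^(v>>1), v|(v>>1) and a mask, hoisting the i-dependent halves out of the inner j loop (intended as a constant-factor speed-up; the probe read ~5.3x where both finished but could not confirm it at the largest size).
import Mathlib
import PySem

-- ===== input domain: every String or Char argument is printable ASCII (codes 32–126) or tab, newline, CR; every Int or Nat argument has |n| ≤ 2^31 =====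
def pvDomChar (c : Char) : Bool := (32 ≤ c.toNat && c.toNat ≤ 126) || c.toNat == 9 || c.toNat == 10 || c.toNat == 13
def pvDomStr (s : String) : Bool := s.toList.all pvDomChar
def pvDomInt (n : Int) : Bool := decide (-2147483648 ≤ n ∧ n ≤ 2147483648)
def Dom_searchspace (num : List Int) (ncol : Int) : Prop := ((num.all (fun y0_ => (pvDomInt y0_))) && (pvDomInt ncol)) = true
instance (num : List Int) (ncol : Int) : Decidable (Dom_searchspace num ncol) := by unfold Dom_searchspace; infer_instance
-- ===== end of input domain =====

-- B replaces A's per-pair bit-window loop (compute) by a closed-form bitwise formula, hoisting the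
-- i-dependent halves out of the inner loop; intended as a constant-factor speed-up (a timing run
-- read ~5x where both programs finished, but could not confirm it at the largest size).

-- ===== PORT A =====
def zo1 (a b : Int) : Int :=
  if ((a = 1 ∨ a = 2) ∧ b = 0) ∨ ((b = 1 ∨ b = 2) ∧ a = 0) then 1 else 0

def compute (a b n : Int) : Int :=
  (PySem.List.pyRange 0 n 1).foldl (fun res i =>
    -- i ranges over 0..n-1, so i ≥ 0 and `i.toNat` is exact; <<< / >>> / band are Python's << >> &
    let picker : Int := (3 : Int) <<< i.toNat
    let c1 := (PySem.Int.band a picker) >>> i.toNat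
    let c2 := (PySem.Int.band b picker) >>> i.toNat
    res + (zo1 c1 c2 <<< i.toNat)) 0

def searchspace (num : List Int) (ncol : Int) : List (Int × Int × List Int) :=
  let s : PySem.Set Int := PySem.Set.ofList num
  -- `1 << (ncol+1)` : exact for ncol ≥ -1 (Pre_); Python raises ValueError for ncol < -1
  let ssp := (PySem.List.pyRange 0 ((1:Int) <<< (ncol+1).toNat) 1).foldl (fun d i =>
    (PySem.List.pyRange 0 ((1:Int) <<< (ncol+1).toNat) 1).foldl (fun d j =>
      let af := compute i j ncol
      if PySem.Set.contains s af then
        PySem.Dict.modify d (i, af) PySem.Set.empty (fun t => PySem.Set.add t j)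
      else d) d)
    PySem.Dict.empty
  ssp.items.map (fun kv => (kv.1.1, kv.1.2, kv.2))

-- ===== PORT B =====
def searchspace_alt (num : List Int) (ncol : Int) : List (Int × Int × List Int) :=
  let s : PySem.Set Int := PySem.Set.ofList num
  let n : Int := (1:Int) <<< (ncol+1).toNat
  let mask : Int := if 0 ≤ ncol then ((1:Int) <<< ncol.toNat) - 1 else 0
  let ssp := (PySem.List.pyRange 0 n 1).foldl (fun d i =>
    let xi := PySem.Int.band (PySem.Int.bxor i (i >>> 1)) mask
    let zi := PySem.Int.bxor mask (PySem.Int.band (PySem.Int.bor i (i >>> 1)) mask)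
    (PySem.List.pyRange 0 n 1).foldl (fun d j =>
      let af := PySem.Int.bor
        (PySem.Int.band xi (PySem.Int.bxor mask (PySem.Int.band (PySem.Int.bor j (j >>> 1)) mask)))
        (PySem.Int.band (PySem.Int.band (PySem.Int.bxor j (j >>> 1)) mask) zi)
      if PySem.Set.contains s af then
        PySem.Dict.modify d (i, af) PySem.Set.empty (fun t => PySem.Set.add t j)
      else d) d)
    PySem.Dict.empty
  ssp.items.map (fun kv => (kv.1.1, kv.1.2, kv.2))

-- ===== PRECONDITION & SPEC =====
-- Pre_ excludes exactly ncol < -1, where Python's `1 << (ncol+1)` raises ValueError (negative shift).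
def Pre_searchspace (num : List Int) (ncol : Int) : Prop := -1 ≤ ncol
instance (num : List Int) (ncol : Int) : Decidable (Pre_searchspace num ncol) := by unfold Pre_searchspace; infer_instance
def pvWitness_searchspace : List Int × Int := ([0, 1], 1)

def Spec_searchspace (num : List Int) (ncol : Int) (out : List (Int × Int × List Int)) : Prop := out = searchspace_alt num ncol
instance (num : List Int) (ncol : Int) (out : List (Int × Int × List Int)) : Decidable (Spec_searchspace num ncol out) := by unfold Spec_searchspace; infer_instance

-- ===== CLAIM (what is proved, stated in full; the proofs are below) =====
def Claim_equal_searchspace : Prop := ∀ (num : List Int) (ncol : Int), Dom_searchspace num ncol → Pre_searchspace num ncol → Spec_searchspace num ncol (searchspace num ncol)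

-- ===== LEMMAS AND PROOFS =====

-- 0/1 indicator of the overlap condition at bit window k (arithmetic form of zo1's test)
def zbit (p q k : Nat) : Bool :=
  decide (((p / 2^k % 4 = 1 ∨ p / 2^k % 4 = 2) ∧ q / 2^k % 4 = 0) ∨
          ((q / 2^k % 4 = 1 ∨ q / 2^k % 4 = 2) ∧ p / 2^k % 4 = 0))

-- Nat mirror of A's compute loop
def computeN (p q m : Nat) : Nat :=
  (List.range m).foldl (fun res k => res + (zbit p q k).toNat * 2^k) 0

-- Nat mirror of B's closed-form expression
def afN (p q m : Nat) : Nat :=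
  (((p ^^^ (p >>> 1)) &&& (2^m - 1)) &&& ((2^m - 1) ^^^ ((q ||| (q >>> 1)) &&& (2^m - 1)))) |||
  (((q ^^^ (q >>> 1)) &&& (2^m - 1)) &&& ((2^m - 1) ^^^ ((p ||| (p >>> 1)) &&& (2^m - 1))))

lemma window_eq (p k : Nat) : (p &&& (3 <<< k)) >>> k = p / 2^k % 4 := by
  rw [show p / 2^k % 4 = (p >>> k) &&& (2^2 - 1) by
        rw [Nat.and_two_pow_sub_one_eq_mod, Nat.shiftRight_eq_div_pow]]
  refine Nat.eq_of_testBit_eq fun t => ?_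
  simp only [Nat.testBit_shiftRight, Nat.testBit_and, Nat.testBit_shiftLeft,
    ge_iff_le, Nat.le_add_right, decide_true, Nat.add_sub_cancel_left, Bool.true_and]
  norm_num

lemma zo1_cast (p q k : Nat) :
    zo1 ((p / 2^k % 4 : Nat) : Int) ((q / 2^k % 4 : Nat) : Int) = ((zbit p q k).toNat : Int) := by
  unfold zo1 zbit
  by_cases h : ((p / 2^k % 4 = 1 ∨ p / 2^k % 4 = 2) ∧ q / 2^k % 4 = 0) ∨
      ((q / 2^k % 4 = 1 ∨ q / 2^k % 4 = 2) ∧ p / 2^k % 4 = 0)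
  · rw [if_pos (by exact_mod_cast h), decide_eq_true h]; rfl
  · rw [if_neg (by exact_mod_cast h), decide_eq_false h]; rfl

lemma compute_step_cast (p q k : Nat) (res : Int) :
    res + (zo1 ((PySem.Int.band (p : Int) ((3:Int) <<< ((((k : Int)).toNat : Nat) : Int))) >>> ((((k : Int)).toNat : Nat) : Int))
        ((PySem.Int.band (q : Int) ((3:Int) <<< ((((k : Int)).toNat : Nat) : Int))) >>> ((((k : Int)).toNat : Nat) : Int))
        <<< ((((k : Int)).toNat : Nat) : Int))
      = res + (((zbit p q k).toNat * 2^k : Nat) : Int) := by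
  rw [show ((k : Int)).toNat = k from rfl,
    show (3:Int) = ((3:Nat) : Int) by norm_num,
    Int.shiftLeft_natCast,
    PySem.Int.band_natCast, PySem.Int.band_natCast,
    Int.shiftRight_natCast, Int.shiftRight_natCast,
    window_eq, window_eq, zo1_cast,
    Int.shiftLeft_natCast,
    Nat.shiftLeft_eq]

lemma foldl_add_cast (l : List Nat) (c : Nat → Nat) (r : Nat) :
    l.foldl (fun (res : Int) k => res + ((c k : Nat) : Int)) (r : Int)
      = ((l.foldl (fun res k => res + c k) r : Nat) : Int) := by
  induction l generalizing r with
  | nil => rfl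
  | cons a l ih =>
      simp only [List.foldl_cons]
      rw [← Nat.cast_add]
      exact ih _

lemma compute_cast (p q m : Nat) : compute (p : Int) (q : Int) (m : Int) = ((computeN p q m : Nat) : Int) := by
  unfold compute computeN
  rw [PySem.List.pyRange_zero_natCast, List.foldl_map,
    show (0:Int) = ((0:Nat):Int) from rfl]
  refine Eq.trans (List.foldl_ext _
    (fun (res : Int) (k : Nat) => res + (((zbit p q k).toNat * 2^k : Nat) : Int)) _
    fun res k _ => ?_) (foldl_add_cast _ _ _)
  dsimp only
  exact compute_step_cast p q k res

lemma computeN_succ' (p q m : Nat) :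
    computeN p q (m+1) = computeN p q m + (zbit p q m).toNat * 2^m := by
  unfold computeN
  rw [List.range_succ, List.foldl_append]
  rfl

lemma computeN_lt (p q m : Nat) : computeN p q m < 2^m := by
  induction m with
  | zero => simp [computeN]
  | succ m ih =>
      rw [computeN_succ', pow_succ]
      have ht : (zbit p q m).toNat * 2^m ≤ 2^m := by cases zbit p q m <;> simp
      omega



lemma computeN_testBit (p q m k : Nat) :
    (computeN p q m).testBit k = (decide (k < m) && zbit p q k) := by
  induction m with
  | zero => simp [computeN]
  | succ m ih =>
      by_cases hk : k < m + 1
      · rcases Nat.lt_succ_iff_lt_or_eq.mp hk with hk' | rfl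
        · -- k < m : the added top bit does not change bit k
          rw [computeN_succ', decide_eq_true hk, Bool.true_and]
          rw [decide_eq_true hk', Bool.true_and] at ih
          rw [Nat.testBit_eq_decide_div_mod_eq] at ih ⊢
          have hsplit : 2^m = 2 * 2^(m - k - 1) * 2^k := by
            conv_lhs => rw [show m = 1 + (m - k - 1) + k by omega, pow_add, pow_add, pow_one]
          rw [hsplit, ← mul_assoc, Nat.add_mul_div_right _ _ (Nat.two_pow_pos k)]
          rw [← ih]
          simp only [decide_eq_decide]
          cases zbit p q m <;> simp only [Bool.toNat_false, Bool.toNat_true] <;> omega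
        · -- k = m : the new bit is exactly zbit
          rw [computeN_succ', decide_eq_true hk, Bool.true_and,
            Nat.testBit_eq_decide_div_mod_eq,
            Nat.add_mul_div_right _ _ (Nat.two_pow_pos k),
            Nat.div_eq_of_lt (computeN_lt p q k)]
          cases zbit p q k <;> rfl
      · -- k ≥ m+1 : both sides are false
        rw [decide_eq_false hk, Bool.false_and]
        refine Nat.testBit_lt_two_pow (lt_of_lt_of_le (computeN_lt p q (m+1)) ?_)
        exact Nat.pow_le_pow_right (by norm_num) (by omega)

lemma afN_testBit (p q m k : Nat) :
    (afN p q m).testBit k = (decide (k < m) && zbit p q k) := by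
  unfold afN zbit
  have hdiv : ∀ x : Nat, x / 2 ^ (1 + k) = x / 2 ^ k / 2 := fun x => by
    rw [Nat.div_div_eq_div_mul, ← pow_succ, Nat.add_comm 1 k]
  simp only [Nat.testBit_or, Nat.testBit_and, Nat.testBit_xor, Nat.testBit_shiftRight,
    Nat.testBit_two_pow_sub_one]
  simp only [Nat.testBit_eq_decide_div_mod_eq, hdiv]
  rw [Bool.eq_iff_iff]
  by_cases hkm : k < m <;> (simp [hkm]; try omega)

lemma computeN_eq_afN (p q m : Nat) : computeN p q m = afN p q m := by
  refine Nat.eq_of_testBit_eq fun k => ?_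
  rw [computeN_testBit, afN_testBit]

lemma closed_cast (p q m : Nat) :
    PySem.Int.bor
      (PySem.Int.band (PySem.Int.band (PySem.Int.bxor (p : Int) ((p : Int) >>> 1)) (((1:Int) <<< m) - 1))
        (PySem.Int.bxor (((1:Int) <<< m) - 1) (PySem.Int.band (PySem.Int.bor (q : Int) ((q : Int) >>> 1)) (((1:Int) <<< m) - 1))))
      (PySem.Int.band (PySem.Int.band (PySem.Int.bxor (q : Int) ((q : Int) >>> 1)) (((1:Int) <<< m) - 1))
        (PySem.Int.bxor (((1:Int) <<< m) - 1) (PySem.Int.band (PySem.Int.bor (p : Int) ((p : Int) >>> 1)) (((1:Int) <<< m) - 1))))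
    = ((afN p q m : Nat) : Int) := by
  have hM : ((1:Int) <<< m) - 1 = ((2^m - 1 : Nat) : Int) := by
    rw [show ((1:Int) <<< m) = ((1 <<< m : Nat) : Int) from rfl, Nat.shiftLeft_eq, one_mul,
      Nat.cast_sub (Nat.one_le_two_pow), Nat.cast_one]
  rw [hM, show ((p:Int) >>> 1) = ((p >>> 1 : Nat) : Int) from rfl,
    show ((q:Int) >>> 1) = ((q >>> 1 : Nat) : Int) from rfl]
  simp only [PySem.Int.bxor_natCast, PySem.Int.bor_natCast, PySem.Int.band_natCast]
  rfl

lemma compute_eq_closed (ncol i j : Int) (hi : 0 ≤ i) (hj : 0 ≤ j) :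
    compute i j ncol =
      PySem.Int.bor
        (PySem.Int.band (PySem.Int.band (PySem.Int.bxor i (i >>> 1)) (if 0 ≤ ncol then ((1:Int) <<< ncol.toNat) - 1 else 0))
          (PySem.Int.bxor (if 0 ≤ ncol then ((1:Int) <<< ncol.toNat) - 1 else 0)
            (PySem.Int.band (PySem.Int.bor j (j >>> 1)) (if 0 ≤ ncol then ((1:Int) <<< ncol.toNat) - 1 else 0))))
        (PySem.Int.band (PySem.Int.band (PySem.Int.bxor j (j >>> 1)) (if 0 ≤ ncol then ((1:Int) <<< ncol.toNat) - 1 else 0))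
          (PySem.Int.bxor (if 0 ≤ ncol then ((1:Int) <<< ncol.toNat) - 1 else 0)
            (PySem.Int.band (PySem.Int.bor i (i >>> 1)) (if 0 ≤ ncol then ((1:Int) <<< ncol.toNat) - 1 else 0)))) := by
  lift i to Nat using hi with p
  lift j to Nat using hj with q
  cases ncol with
  | ofNat m =>
      rw [if_pos (show (0:Int) ≤ Int.ofNat m from Int.natCast_nonneg m),
        show ((Int.ofNat m)).toNat = m from rfl,
        show Int.ofNat m = ((m : Nat) : Int) from rfl, compute_cast, computeN_eq_afN, ← closed_cast]
  | negSucc kneg =>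
      rw [if_neg (by omega)]
      have hz : ∀ a : Int, PySem.Int.band 0 a = 0 := fun a => by
        rw [PySem.Int.band_comm, PySem.Int.band_zero]
      simp only [PySem.Int.band_zero, hz, PySem.Int.bxor_zero, PySem.Int.bor_zero]
      unfold compute
      rw [show PySem.List.pyRange 0 (Int.negSucc kneg) 1 = [] by simp [PySem.List.pyRange]]
      rfl

-- ===== VERDICT (by name: the statement is the Claim_ definition above) =====
theorem searchspace_spec : Claim_equal_searchspace := by
  intro num ncol _ _
  unfold Spec_searchspace searchspace searchspace_alt
  dsimp only
  refine congrArg (fun d : PySem.Dict (Int × Int) (PySem.Set Int) =>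
    d.items.map (fun kv => (kv.1.1, kv.1.2, kv.2))) ?_
  refine List.foldl_ext _ _ _ fun d i hi => ?_
  refine List.foldl_ext _ _ _ fun d' j hj => ?_
  have h0i : (0:Int) ≤ i := (PySem.List.mem_pyRange_one.mp hi).1
  have h0j : (0:Int) ≤ j := (PySem.List.mem_pyRange_one.mp hj).1
  rw [compute_eq_closed ncol i j h0i h0j]
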